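-- pv_equiv track=rewrite | github.com/mtchibozo/Telecom | Data Science/Scholar-Affiliation-Recognition-Project/paf-affiliations-data_mining/DataCollectionFromHAL.py | tree_to_recursive_path_strings
-- ===== SOURCE A (Python) =====
-- def tree_to_recursive_path_strings(affiliation, path_string, Structure_to_Parent_MAP):
--     #Path_Strings=[path_string] # stocke tous les sous chemins aussi
--     Path_Strings=[]
--     if affiliation in Structure_to_Parent_MAP:
--         parentSet = Structure_to_Parent_MAP[affiliation]
--         for parent in parentSet:
--             parent_path_string=path_string+" --- "+parent
--             Path_Strings+=tree_to_recursive_path_strings(parent, parent_path_string, Structure_to_Parent_MAP)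
--         return Path_Strings
--     return [path_string]
-- ===== SOURCE B (Python) =====
-- def tree_to_recursive_path_strings(affiliation, path_string, Structure_to_Parent_MAP):
--     # Iterative pre-order DFS with an explicit stack instead of recursion + list concatenation.
--     result = []
--     stack = [(affiliation, path_string)]
--     while stack:
--         node, path = stack.pop()
--         if node in Structure_to_Parent_MAP:
--             for parent in reversed(list(Structure_to_Parent_MAP[node])):
--                 stack.append((parent, path + " --- " + parent))
--         else:
--             result.append(path)
--     return result
-- ===== Notes on version B (the rewrite author's own statement) =====
-- stated objective: alternative
-- what changed: Replaces the recursive function (which builds the output by concatenating the lists returned by recursive calls) with an iterative explicit-stack pre-order DFS that appends leaf paths to a single accumulator; parents are pushed in reversed order so the emitted order is identical.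
import Mathlib
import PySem

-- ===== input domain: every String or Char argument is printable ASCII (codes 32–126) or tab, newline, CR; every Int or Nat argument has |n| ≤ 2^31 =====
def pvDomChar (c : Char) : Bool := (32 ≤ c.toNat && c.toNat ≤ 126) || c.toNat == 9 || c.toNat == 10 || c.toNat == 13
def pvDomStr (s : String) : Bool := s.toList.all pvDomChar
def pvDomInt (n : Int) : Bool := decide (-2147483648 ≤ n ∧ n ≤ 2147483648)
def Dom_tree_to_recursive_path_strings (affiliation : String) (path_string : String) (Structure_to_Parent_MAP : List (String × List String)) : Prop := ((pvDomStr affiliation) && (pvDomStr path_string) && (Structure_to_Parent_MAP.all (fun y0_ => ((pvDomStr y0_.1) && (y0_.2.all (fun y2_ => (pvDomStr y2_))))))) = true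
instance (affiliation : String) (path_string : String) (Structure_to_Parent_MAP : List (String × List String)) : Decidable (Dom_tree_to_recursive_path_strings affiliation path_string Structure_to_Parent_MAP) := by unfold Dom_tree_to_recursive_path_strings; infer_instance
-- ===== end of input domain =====

-- B replaces A's recursion (concatenating recursive results) by an iterative explicit-stack
-- pre-order DFS with a single accumulator; objective: alternative (same output, same cost class).


-- ===== PORT A =====
-- dict lookup (first match under the association-list convention)
def pvLookup (m : List (String × List String)) (a : String) : Option (List String) :=
  (PySem.Dict.mk m).get? a

-- A's recursion, made total with a fuel guard (fuel only makes the same computation total;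
-- on every input admitted by Pre_ the fuel m.length+1 is never exhausted)
def pvGoA (m : List (String × List String)) : Nat → String → String → List String
  | 0, _, _ => []
  | fuel+1, affiliation, path_string =>
    match pvLookup m affiliation with
    | some parentSet =>
        parentSet.foldl (fun Path_Strings parent =>
          Path_Strings ++ pvGoA m fuel parent (path_string ++ " --- " ++ parent)) []
    | none => [path_string]

def tree_to_recursive_path_strings (affiliation : String) (path_string : String) (Structure_to_Parent_MAP : List (String × List String)) : List String :=
  pvGoA Structure_to_Parent_MAP (Structure_to_Parent_MAP.length + 1) affiliation path_string

-- ===== PORT B =====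
-- bound on how many entries one pop can push (used only for termination)
def pvW (m : List (String × List String)) : Nat := (m.map (fun p => p.2.length)).sum

-- termination helper: a successful lookup returns one of the map's value lists
theorem pvLookup_mem_values : ∀ (m : List (String × List String)) (a : String) (v : List String),
    pvLookup m a = some v → v ∈ m.map (·.2) := by
  intro m
  induction m with
  | nil => intro a v h; simp [pvLookup, PySem.Dict.get?] at h
  | cons p rest ih =>
    intro a v h
    rw [pvLookup, PySem.Dict.get?_mk_cons] at h
    by_cases hk : p.1 == a
    · simp [hk] at h; simp [← h]
    · simp [hk] at h
      exact List.mem_cons_of_mem _ (ih a v h)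

theorem pvLookup_len_le (m : List (String × List String)) (a : String) (v : List String)
    (h : pvLookup m a = some v) : v.length ≤ pvW m := by
  have hv := pvLookup_mem_values m a v h
  have : v.length ∈ (m.map (fun p => p.2.length)) := by
    simpa using List.mem_map_of_mem hv
  exact List.le_sum_of_mem (by simpa [pvW] using this)

-- B's while-loop: stack of (depth-fuel, node, path) pairs, top = head; the fuel component is
-- only a totality guard (Python B's stack carries (node, path)); popping a node found in the
-- map pushes its parents (Python pushes them reversed onto the list-end stack, which equals
-- prepending them in order here), otherwise the path is appended to the accumulator.
def pvLoopB (m : List (String × List String)) : List (Nat × String × String) → List String → List String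
  | [], result => result
  | (0, _, _) :: rest, result => pvLoopB m rest result
  | (fuel+1, node, path) :: rest, result =>
    match h : pvLookup m node with
    | some parents =>
        pvLoopB m (parents.map (fun parent => (fuel, parent, path ++ " --- " ++ parent)) ++ rest) result
    | none => pvLoopB m rest (result ++ [path])
  termination_by stack _ => (stack.map (fun e => (pvW m + 1) ^ e.1)).sum
  decreasing_by
  all_goals simp only [List.map_cons, List.sum_cons, List.map_append, List.sum_append, List.map_map]
  · have h0 : (pvW m + 1) ^ 0 = 1 := pow_zero _
    omega
  · have hlen := pvLookup_len_le m node parents h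
    have hc : (List.map ((fun e => (pvW m + 1) ^ e.1) ∘ fun parent => (fuel, parent, path ++ " --- " ++ parent)) parents).sum
        = parents.length * (pvW m + 1) ^ fuel := by
      simp [Function.comp_def, List.map_const']
    have hmul : parents.length * (pvW m + 1) ^ fuel ≤ pvW m * (pvW m + 1) ^ fuel :=
      Nat.mul_le_mul_right _ hlen
    have h2 : (pvW m + 1) ^ fuel.succ = pvW m * (pvW m + 1) ^ fuel + (pvW m + 1) ^ fuel := by
      rw [pow_succ]; ring
    have hpow : 1 ≤ (pvW m + 1) ^ fuel := Nat.one_le_pow _ _ (by omega)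
    omega
  · have hpow : 1 ≤ (pvW m + 1) ^ fuel.succ := Nat.one_le_pow _ _ (by omega)
    omega

def tree_to_recursive_path_strings_alt (affiliation : String) (path_string : String) (Structure_to_Parent_MAP : List (String × List String)) : List String :=
  pvLoopB Structure_to_Parent_MAP [(Structure_to_Parent_MAP.length + 1, affiliation, path_string)] []

-- ===== PRECONDITION & SPEC =====
-- reachable-set helpers for the acyclicity precondition (checked by iterated expansion,
-- not by running either port's traversal)
def pvParents (m : List (String × List String)) (a : String) : List String :=
  (pvLookup m a).getD []

def pvExpand (m : List (String × List String)) : Nat → List String → List String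
  | 0, R => R
  | n+1, R => pvExpand m n ((R ++ R.flatMap (pvParents m)).dedup)

-- Pre_ excludes exactly the inputs on which Python A does not return: maps in which some node
-- reachable from `affiliation` lies on a parent-cycle (there the recursion raises RecursionError).
def Pre_tree_to_recursive_path_strings (affiliation : String) (path_string : String) (Structure_to_Parent_MAP : List (String × List String)) : Prop :=
  ∀ a ∈ pvExpand Structure_to_Parent_MAP (Structure_to_Parent_MAP.length + 1) [affiliation],
    a ∉ pvExpand Structure_to_Parent_MAP (Structure_to_Parent_MAP.length + 1) (pvParents Structure_to_Parent_MAP a)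

instance (affiliation : String) (path_string : String) (Structure_to_Parent_MAP : List (String × List String)) : Decidable (Pre_tree_to_recursive_path_strings affiliation path_string Structure_to_Parent_MAP) := by unfold Pre_tree_to_recursive_path_strings; infer_instance

def pvWitness_tree_to_recursive_path_strings : String × String × (List (String × List String)) :=
  ("a", "a", [("a", ["b", "c"]), ("b", ["c"])])

def Spec_tree_to_recursive_path_strings (affiliation : String) (path_string : String) (Structure_to_Parent_MAP : List (String × List String)) (out : List String) : Prop := out = tree_to_recursive_path_strings_alt affiliation path_string Structure_to_Parent_MAP
instance (affiliation : String) (path_string : String) (Structure_to_Parent_MAP : List (String × List String)) (out : List String) : Decidable (Spec_tree_to_recursive_path_strings affiliation path_string Structure_to_Parent_MAP out) := by unfold Spec_tree_to_recursive_path_strings; infer_instance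

-- ===== CLAIM (what is proved, stated in full; the proofs are below) =====
def Claim_equal_tree_to_recursive_path_strings : Prop := ∀ (affiliation : String) (path_string : String) (Structure_to_Parent_MAP : List (String × List String)), Dom_tree_to_recursive_path_strings affiliation path_string Structure_to_Parent_MAP → Pre_tree_to_recursive_path_strings affiliation path_string Structure_to_Parent_MAP → Spec_tree_to_recursive_path_strings affiliation path_string Structure_to_Parent_MAP (tree_to_recursive_path_strings affiliation path_string Structure_to_Parent_MAP)

-- ===== LEMMAS AND PROOFS =====
-- loop invariant: the stack machine yields the accumulator followed by the concatenation of
-- A's recursion applied to each pending stack entry (with its per-entry fuel)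
theorem pvLoopB_spec (m : List (String × List String)) :
    ∀ (stack : List (Nat × String × String)) (result : List String),
      pvLoopB m stack result = result ++ stack.flatMap (fun e => pvGoA m e.1 e.2.1 e.2.2) := by
  intro stack result
  induction stack, result using pvLoopB.induct m with
  | case1 result => simp [pvLoopB]
  | case2 n p rest result ih => simp [pvLoopB, pvGoA, ih]
  | case3 fuel node path rest result parents h ih =>
    rw [pvLoopB]
    split
    · rename_i parents' h'
      rw [h] at h'
      injection h' with hp
      subst hp
      rw [ih]
      simp only [List.flatMap_cons, List.flatMap_append, List.flatMap_map]
      rw [pvGoA.eq_def]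
      simp [h, List.flatMap_def]
    · rename_i h'
      rw [h] at h'
      cases h'
  | case4 fuel node path rest result h ih =>
    rw [pvLoopB]
    split
    · rename_i parents' h'
      rw [h] at h'
      cases h'
    · rw [ih]
      simp only [List.flatMap_cons]
      rw [pvGoA.eq_def]
      simp [h]

-- ===== VERDICT (by name: the statement is the Claim_ definition above) =====
theorem tree_to_recursive_path_strings_spec : Claim_equal_tree_to_recursive_path_strings := by
  intro affiliation path_string m _hdom _hpre
  unfold Spec_tree_to_recursive_path_strings tree_to_recursive_path_strings tree_to_recursive_path_strings_alt
  rw [pvLoopB_spec]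
  simp
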